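-- pv_equiv track=rewrite | github.com/challengekim/snowball-email | assets/run_round.py | _resolve_choice
-- ===== SOURCE A (Python) =====
-- def _resolve_choice(choice: str, drafts: list[dict]) -> list[dict]:
--     if choice in ("", "skip", "none", "n"):
--         return []
--     if choice in ("all", "a", "전부"):
--         return list(drafts)
--     selected: set[int] = set()
--     for tok in choice.replace(" ", "").split(","):
--         if "-" in tok:
--             try:
--                 lo, hi = (int(x) for x in tok.split("-", 1))
--                 for i in range(lo, hi + 1):
--                     selected.add(i)
--             except ValueError:
--                 continue
--         else:
--             try:
--                 selected.add(int(tok))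
--             except ValueError:
--                 continue
--     return [d for i, d in enumerate(drafts, 1) if i in selected]
-- ===== SOURCE B (Python) =====
-- def _token_range(tok):
--     """Parse one selection token into an inclusive (lo, hi) range; None = malformed, skip it."""
--     if "-" in tok:
--         lo_s, hi_s = tok.split("-", 1)
--         try:
--             return (int(lo_s), int(hi_s))
--         except ValueError:
--             return None
--     try:
--         n = int(tok)
--     except ValueError:
--         return None
--     return (n, n)
--
--
-- def _resolve_choice(choice: str, drafts: list[dict]) -> list[dict]:
--     if choice in ("", "skip", "none", "n"):
--         return []
--     if choice in ("all", "a", "전부"):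
--         return list(drafts)
--     tokens = choice.replace(" ", "").split(",")
--     picked = []
--     index = 1
--     for d in drafts:
--         for tok in tokens:
--             rng = _token_range(tok)
--             if rng is not None and rng[0] <= index <= rng[1]:
--                 picked.append(d)
--                 break
--         index += 1
--     return picked
-- ===== Notes on version B (the rewrite author's own statement) =====
-- stated objective: alternative
-- what changed: B drops A's set-building pass entirely: instead of expanding every range token into a set of indices and then filtering by set membership, B walks the drafts once with an index counter and tests each index directly against the tokens via a per-token (lo,hi) range parser.
import Mathlib
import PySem

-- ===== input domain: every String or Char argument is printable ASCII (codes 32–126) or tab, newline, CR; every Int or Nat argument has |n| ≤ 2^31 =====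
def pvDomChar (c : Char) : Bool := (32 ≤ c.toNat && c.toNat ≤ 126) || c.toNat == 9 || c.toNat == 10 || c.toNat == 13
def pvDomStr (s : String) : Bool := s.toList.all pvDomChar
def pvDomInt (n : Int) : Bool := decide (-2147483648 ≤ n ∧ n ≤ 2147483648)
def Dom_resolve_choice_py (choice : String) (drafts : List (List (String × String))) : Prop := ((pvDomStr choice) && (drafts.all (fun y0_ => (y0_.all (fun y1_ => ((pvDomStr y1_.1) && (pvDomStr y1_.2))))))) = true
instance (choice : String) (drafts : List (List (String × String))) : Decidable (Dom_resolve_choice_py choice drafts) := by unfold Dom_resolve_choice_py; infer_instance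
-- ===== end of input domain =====

-- B removes A's set-building pass: no index set is materialised; drafts are walked once with a
-- counter and each index is tested directly against the per-token (lo,hi) ranges (objective: alternative).

-- ===== PORT A =====
-- one loop iteration of A: try to add tok's indices to the set, skipping on ValueError
def pvStepA (sel : PySem.Set Int) (tok : String) : PySem.Set Int :=
  if PySem.Str.isIn "-" tok then
    match (PySem.Str.splitMax? tok "-" 1).getD [] with
    | [p0, p1] =>
      (match PySem.Int.ofStr? p0 with
       | none => sel
       | some lo =>
         match PySem.Int.ofStr? p1 with
         | none => sel
         | some hi => (PySem.List.pyRange lo (hi + 1) 1).foldl (fun s i => PySem.Set.add s i) sel)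
    | _ => sel
  else
    match PySem.Int.ofStr? tok with
    | none => sel
    | some n => PySem.Set.add sel n

def resolve_choice_py (choice : String) (drafts : List (List (String × String))) : List (List (String × String)) :=
  if choice = "" ∨ choice = "skip" ∨ choice = "none" ∨ choice = "n" then []
  else if choice = "all" ∨ choice = "a" ∨ choice = "전부" then drafts
  else
    let selected : PySem.Set Int :=
      ((PySem.Str.split? (PySem.Str.replace choice " " "") ",").getD []).foldl pvStepA PySem.Set.empty
    ((PySem.List.enumerate drafts 1).filter (fun p => PySem.Set.contains selected p.1)).map (·.2)

-- ===== PORT B =====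
-- _token_range: one token to an inclusive (lo, hi) range; none = malformed, skipped
def pvTokenRange (tok : String) : Option (Int × Int) :=
  if PySem.Str.isIn "-" tok then
    match (PySem.Str.splitMax? tok "-" 1).getD [] with
    | [lo_s, hi_s] =>
      match PySem.Int.ofStr? lo_s, PySem.Int.ofStr? hi_s with
      | some lo, some hi => some (lo, hi)
      | _, _ => none
    | _ => none
  else
    (PySem.Int.ofStr? tok).map (fun n => (n, n))

-- the draft loop of B: walk the drafts with the running 1-based index, keep d when some token's range covers it
def pvPick (toks : List String) : Int → List (List (String × String)) → List (List (String × String))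
  | _, [] => []
  | index, d :: ds =>
    if toks.any (fun tok =>
        match pvTokenRange tok with
        | some rng => decide (rng.1 ≤ index) && decide (index ≤ rng.2)
        | none => false)
    then d :: pvPick toks (index + 1) ds
    else pvPick toks (index + 1) ds

def resolve_choice_py_alt (choice : String) (drafts : List (List (String × String))) : List (List (String × String)) :=
  if choice = "" ∨ choice = "skip" ∨ choice = "none" ∨ choice = "n" then []
  else if choice = "all" ∨ choice = "a" ∨ choice = "전부" then drafts
  else
    pvPick ((PySem.Str.split? (PySem.Str.replace choice " " "") ",").getD []) 1 drafts

-- ===== PRECONDITION & SPEC =====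
def Spec_resolve_choice_py (choice : String) (drafts : List (List (String × String))) (out : List (List (String × String))) : Prop := out = resolve_choice_py_alt choice drafts
instance (choice : String) (drafts : List (List (String × String))) (out : List (List (String × String))) : Decidable (Spec_resolve_choice_py choice drafts out) := by unfold Spec_resolve_choice_py; infer_instance

-- ===== CLAIM (what is proved, stated in full; the proofs are below) =====
def Claim_equal_resolve_choice_py : Prop := ∀ (choice : String) (drafts : List (List (String × String))), Dom_resolve_choice_py choice drafts → Spec_resolve_choice_py choice drafts (resolve_choice_py choice drafts)

-- ===== LEMMAS AND PROOFS =====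

-- the boolean B tests for one token
def pvCov (tok : String) (i : Int) : Bool :=
  match pvTokenRange tok with
  | some rng => decide (rng.1 ≤ i) && decide (i ≤ rng.2)
  | none => false

-- one step of A's set-building adds exactly the indices pvCov tok covers
theorem pvStepA_mem (tok : String) (sel : PySem.Set Int) (i : Int) :
    i ∈ pvStepA sel tok ↔ (i ∈ sel ∨ pvCov tok i = true) := by
  unfold pvStepA pvCov pvTokenRange
  split_ifs with hdash
  · rcases hp : (PySem.Str.splitMax? tok "-" 1).getD [] with _ | ⟨p0, _ | ⟨p1, _ | ⟨q, rest⟩⟩⟩ <;>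
      simp only
    · simp
    · simp
    · cases h0 : PySem.Int.ofStr? p0 with
      | none => simp
      | some lo =>
        cases h1 : PySem.Int.ofStr? p1 with
        | none => simp
        | some hi =>
          rw [PySem.Set.mem_foldl_add (f := fun (i : Int) => i)]
          simp only [Bool.and_eq_true, decide_eq_true_eq]
          constructor
          · rintro (hs | ⟨b, hb, rfl⟩)
            · exact Or.inl hs
            · rw [PySem.List.mem_pyRange_one] at hb
              exact Or.inr ⟨by omega, by omega⟩
          · rintro (hs | ⟨ha, hb⟩)
            · exact Or.inl hs
            · exact Or.inr ⟨i, by rw [PySem.List.mem_pyRange_one]; omega, rfl⟩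
    · simp
  · cases h0 : PySem.Int.ofStr? tok with
    | none => simp
    | some n =>
      rw [PySem.Set.mem_add]
      simp only [Option.map_some, Bool.and_eq_true, decide_eq_true_eq]
      constructor
      · rintro (hs | rfl)
        · exact Or.inl hs
        · exact Or.inr ⟨le_refl _, le_refl _⟩
      · rintro (hs | ⟨ha, hb⟩)
        · exact Or.inl hs
        · exact Or.inr (le_antisymm hb ha)

-- A's whole set contains i iff some token covers i
theorem pvFoldA_mem (toks : List String) (sel : PySem.Set Int) (i : Int) :
    i ∈ toks.foldl pvStepA sel ↔ (i ∈ sel ∨ toks.any (fun tok => pvCov tok i) = true) := by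
  induction toks generalizing sel with
  | nil => simp
  | cons t ts ih =>
    rw [List.foldl_cons, ih, pvStepA_mem]
    simp [or_assoc]

-- B's draft walk equals filter-by-cover over the enumeration
theorem pvPick_eq (toks : List String) (i : Int) (ds : List (List (String × String))) :
    pvPick toks i ds =
      ((PySem.List.enumerate ds i).filter
        (fun p => toks.any (fun tok => pvCov tok p.1))).map (·.2) := by
  induction ds generalizing i with
  | nil => simp [pvPick, PySem.List.enumerate_nil]
  | cons d ds ih =>
    rw [PySem.List.enumerate_cons]
    show (if toks.any (fun tok => pvCov tok i) = true then _ else _) = _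
    rw [List.filter_cons]
    by_cases h : toks.any (fun tok => pvCov tok i) = true
    · simp only [h, if_pos, List.map_cons]
      rw [ih]
    · simp only [h]
      simp only [if_false, Bool.false_eq_true]
      rw [ih]

-- ===== VERDICT (by name: the statement is the Claim_ definition above) =====
theorem resolve_choice_py_spec : Claim_equal_resolve_choice_py := by
  intro choice drafts _
  unfold Spec_resolve_choice_py resolve_choice_py resolve_choice_py_alt
  split_ifs with h1 h2
  · rfl
  · rfl
  · rw [pvPick_eq]
    refine congrArg (List.map _) (List.filter_congr ?_)
    intro p _
    rw [Bool.eq_iff_iff, PySem.Set.contains_iff,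
      pvFoldA_mem _ PySem.Set.empty p.1]
    simp only [PySem.Set.empty, List.not_mem_nil, false_or]
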